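-- pv_equiv track=rewrite | github.com/AjeetSinghAvdeel/Secure-Agent-Browser | backend/api.py | _classify_attack
-- ===== SOURCE A (Python) =====
-- from typing import Any, Dict, List
--
-- def _classify_attack(indicators: List[str]) -> str:
--     lowered = [str(item).lower() for item in indicators]
--
--     if any("prompt" in item and "inject" in item for item in lowered):
--         return "Prompt Injection"
--     if any("clickjacking" in item or "overlay" in item for item in lowered):
--         return "Clickjacking"
--     if any("script_injection" in item or "event_hijacking" in item for item in lowered):
--         return "Dynamic Script Attack"
--     if any("phishing" in item or "credential_harvest" in item for item in lowered):
--         return "Phishing"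
--     if any(
--         token in item
--         for item in lowered
--         for token in ("base64", "hex", "unicode", "hidden", "obfuscat")
--     ):
--         return "Obfuscation"
--     if any("threat_intel" in item for item in lowered):
--         return "Known Threat"
--     return "Suspicious Content"
-- ===== SOURCE B (Python) =====
-- def _classify_attack(indicators):
--     lowered = [str(item).lower() for item in indicators]
--     prompt = click = script = phish = obf = threat = False
--     for item in lowered:
--         prompt = prompt or ("prompt" in item and "inject" in item)
--         click = click or "clickjacking" in item or "overlay" in item
--         script = script or "script_injection" in item or "event_hijacking" in item
--         phish = phish or "phishing" in item or "credential_harvest" in item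
--         obf = obf or any(token in item for token in ("base64", "hex", "unicode", "hidden", "obfuscat"))
--         threat = threat or "threat_intel" in item
--     if prompt:
--         return "Prompt Injection"
--     if click:
--         return "Clickjacking"
--     if script:
--         return "Dynamic Script Attack"
--     if phish:
--         return "Phishing"
--     if obf:
--         return "Obfuscation"
--     if threat:
--         return "Known Threat"
--     return "Suspicious Content"
-- ===== Notes on version B (the rewrite author's own statement) =====
-- stated objective: alternative
-- what changed: Replaces six separate short-circuiting any() scans over the lowered list with a single pass that accumulates six boolean flags, followed by a priority-ordered resolution of the flags.
import Mathlib
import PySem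

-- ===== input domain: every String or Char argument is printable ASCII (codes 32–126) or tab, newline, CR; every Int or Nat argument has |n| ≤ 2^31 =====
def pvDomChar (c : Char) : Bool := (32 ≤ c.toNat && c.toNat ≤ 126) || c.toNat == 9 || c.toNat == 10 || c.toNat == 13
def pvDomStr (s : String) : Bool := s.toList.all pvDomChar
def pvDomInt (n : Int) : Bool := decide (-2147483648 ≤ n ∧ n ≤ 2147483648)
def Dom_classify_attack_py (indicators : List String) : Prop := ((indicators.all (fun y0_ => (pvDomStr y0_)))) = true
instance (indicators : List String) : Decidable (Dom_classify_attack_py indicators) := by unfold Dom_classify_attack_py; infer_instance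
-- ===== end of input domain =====

-- B replaces A's six separate short-circuiting scans by one flag-accumulating pass
-- plus a priority resolution of the flags (alternative decomposition, same cost).

-- ===== PORT A =====
def classify_attack_py (indicators : List String) : String :=
  let lowered := indicators.map (fun item => PySem.Str.lower item)
  if lowered.any (fun item => PySem.Str.isIn "prompt" item && PySem.Str.isIn "inject" item) then
    "Prompt Injection"
  else if lowered.any (fun item => PySem.Str.isIn "clickjacking" item || PySem.Str.isIn "overlay" item) then
    "Clickjacking"
  else if lowered.any (fun item => PySem.Str.isIn "script_injection" item || PySem.Str.isIn "event_hijacking" item) then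
    "Dynamic Script Attack"
  else if lowered.any (fun item => PySem.Str.isIn "phishing" item || PySem.Str.isIn "credential_harvest" item) then
    "Phishing"
  else if lowered.any (fun item =>
      (["base64", "hex", "unicode", "hidden", "obfuscat"] : List String).any
        (fun token => PySem.Str.isIn token item)) then
    "Obfuscation"
  else if lowered.any (fun item => PySem.Str.isIn "threat_intel" item) then
    "Known Threat"
  else
    "Suspicious Content"

-- ===== PORT B =====
-- one step of Source B's flag-accumulating loop
def classifyStep (f : Bool × Bool × Bool × Bool × Bool × Bool) (item : String) :
    Bool × Bool × Bool × Bool × Bool × Bool :=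
  (f.1 || (PySem.Str.isIn "prompt" item && PySem.Str.isIn "inject" item),
   f.2.1 || PySem.Str.isIn "clickjacking" item || PySem.Str.isIn "overlay" item,
   f.2.2.1 || PySem.Str.isIn "script_injection" item || PySem.Str.isIn "event_hijacking" item,
   f.2.2.2.1 || PySem.Str.isIn "phishing" item || PySem.Str.isIn "credential_harvest" item,
   f.2.2.2.2.1 || (["base64", "hex", "unicode", "hidden", "obfuscat"] : List String).any
       (fun token => PySem.Str.isIn token item),
   f.2.2.2.2.2 || PySem.Str.isIn "threat_intel" item)

def classify_attack_py_alt (indicators : List String) : String :=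
  let lowered := indicators.map (fun item => PySem.Str.lower item)
  let f := lowered.foldl classifyStep (false, false, false, false, false, false)
  if f.1 then "Prompt Injection"
  else if f.2.1 then "Clickjacking"
  else if f.2.2.1 then "Dynamic Script Attack"
  else if f.2.2.2.1 then "Phishing"
  else if f.2.2.2.2.1 then "Obfuscation"
  else if f.2.2.2.2.2 then "Known Threat"
  else "Suspicious Content"

-- ===== PRECONDITION & SPEC =====
def Spec_classify_attack_py (indicators : List String) (out : String) : Prop := out = classify_attack_py_alt indicators
instance (indicators : List String) (out : String) : Decidable (Spec_classify_attack_py indicators out) := by unfold Spec_classify_attack_py; infer_instance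

-- ===== CLAIM (what is proved, stated in full; the proofs are below) =====
def Claim_equal_classify_attack_py : Prop := ∀ (indicators : List String), Dom_classify_attack_py indicators → Spec_classify_attack_py indicators (classify_attack_py indicators)

-- ===== LEMMAS AND PROOFS =====

-- the flag fold computes exactly the six any-scans of A
theorem foldl_classifyStep (l : List String) (f : Bool × Bool × Bool × Bool × Bool × Bool) :
    l.foldl classifyStep f =
      (f.1 || l.any (fun item => PySem.Str.isIn "prompt" item && PySem.Str.isIn "inject" item),
       f.2.1 || l.any (fun item => PySem.Str.isIn "clickjacking" item || PySem.Str.isIn "overlay" item),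
       f.2.2.1 || l.any (fun item => PySem.Str.isIn "script_injection" item || PySem.Str.isIn "event_hijacking" item),
       f.2.2.2.1 || l.any (fun item => PySem.Str.isIn "phishing" item || PySem.Str.isIn "credential_harvest" item),
       f.2.2.2.2.1 || l.any (fun item =>
         (["base64", "hex", "unicode", "hidden", "obfuscat"] : List String).any
           (fun token => PySem.Str.isIn token item)),
       f.2.2.2.2.2 || l.any (fun item => PySem.Str.isIn "threat_intel" item)) := by
  induction l generalizing f with
  | nil => simp
  | cons x xs ih =>
    simp [List.foldl_cons, ih, classifyStep, List.any_cons, Bool.or_assoc]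

-- ===== VERDICT (by name: the statement is the Claim_ definition above) =====
theorem classify_attack_py_spec : Claim_equal_classify_attack_py := by
  intro indicators _
  unfold Spec_classify_attack_py classify_attack_py classify_attack_py_alt
  simp only [foldl_classifyStep, Bool.false_or]
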